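-- pv_equiv track=rewrite | github.com/sgajbi/lotus-core | tests/test_support/runtime_modes.py | detect_runtime_modes
-- ===== SOURCE A (Python) =====
-- from collections.abc import Iterable
--
-- def classify_runtime_mode(nodeid: str, marker_names: Iterable[str] = ()) -> str | None:
--     normalized = nodeid.replace("\\", "/").lower()
--     normalized_markers = {name.lower() for name in marker_names}
--
--     if "tests/e2e/" in normalized:
--         return "live_worker"
--     if "tests/integration/" in normalized or "integration_db" in normalized_markers:
--         return "db_direct"
--     return None
--
-- def detect_runtime_modes(
--     collected_items: Iterable[tuple[str, Iterable[str]]],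
-- ) -> dict[str, list[str]]:
--     modes: dict[str, list[str]] = {}
--     for nodeid, marker_names in collected_items:
--         runtime_mode = classify_runtime_mode(nodeid, marker_names)
--         if runtime_mode is None:
--             continue
--         modes.setdefault(runtime_mode, []).append(nodeid)
--     return modes
-- ===== SOURCE B (Python) =====
-- from collections.abc import Iterable
--
-- def classify_runtime_mode(nodeid: str, marker_names: Iterable[str] = ()) -> str | None:
--     normalized = nodeid.replace("\\", "/").lower()
--     normalized_markers = {name.lower() for name in marker_names}
--
--     if "tests/e2e/" in normalized:
--         return "live_worker"
--     if "tests/integration/" in normalized or "integration_db" in normalized_markers: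
--         return "db_direct"
--     return None
--
-- def detect_runtime_modes(collected_items):
--     # Materialize once (collected_items may be a one-shot iterable), then build
--     # each group with its own directed filtering pass; key order = first appearance.
--     items = [(nodeid, list(marker_names)) for nodeid, marker_names in collected_items]
--     order = dict.fromkeys(
--         mode
--         for nodeid, marker_names in items
--         if (mode := classify_runtime_mode(nodeid, marker_names)) is not None
--     )
--     return {
--         mode: [nodeid for nodeid, marker_names in items
--                if classify_runtime_mode(nodeid, marker_names) == mode]
--         for mode in order
--     }
-- ===== Notes on version B (the rewrite author's own statement) =====
-- stated objective: alternative
-- what changed: Replaces the single accumulate-as-you-go pass with a dict of growing lists by a group-by decomposition: materialize the items, compute the mode order as an ordered dedup of the classifications, then build each mode's node list with its own filtering pass.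
import Mathlib
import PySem

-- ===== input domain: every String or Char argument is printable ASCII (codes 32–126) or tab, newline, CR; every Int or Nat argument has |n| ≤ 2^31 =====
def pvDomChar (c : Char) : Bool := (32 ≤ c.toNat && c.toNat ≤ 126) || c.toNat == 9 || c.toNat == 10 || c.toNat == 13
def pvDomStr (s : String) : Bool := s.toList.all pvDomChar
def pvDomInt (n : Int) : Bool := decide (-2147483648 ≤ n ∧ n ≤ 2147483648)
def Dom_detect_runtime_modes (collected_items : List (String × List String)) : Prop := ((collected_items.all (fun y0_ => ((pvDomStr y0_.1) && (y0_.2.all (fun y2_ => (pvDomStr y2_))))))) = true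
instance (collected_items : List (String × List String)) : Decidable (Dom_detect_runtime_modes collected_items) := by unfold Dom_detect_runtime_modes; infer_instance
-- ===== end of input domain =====

-- B replaces A's single accumulate-as-you-go dict pass by a group-by decomposition
-- (ordered dedup of the classifications, then one filtering pass per mode); objective: alternative, same cost.

-- ===== PORT A =====
def classifyRuntimeMode (nodeid : String) (markerNames : List String) : Option String :=
  let normalized := PySem.Str.lower (PySem.Str.replace nodeid "\\" "/")
  let normalizedMarkers : PySem.Set String := PySem.Set.ofList (markerNames.map (fun name => PySem.Str.lower name))
  if PySem.Str.isIn "tests/e2e/" normalized then some "live_worker"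
  else if PySem.Str.isIn "tests/integration/" normalized || PySem.Set.contains normalizedMarkers "integration_db" then some "db_direct"
  else none

def detect_runtime_modes (collected_items : List (String × List String)) : List (String × List String) :=
  (collected_items.foldl
    (fun (modes : PySem.Dict String (List String)) item =>
      match classifyRuntimeMode item.1 item.2 with
      | none => modes
      | some runtimeMode => modes.modify runtimeMode [] (fun xs => xs ++ [item.1]))
    PySem.Dict.empty).items

-- ===== PORT B =====
def detect_runtime_modes_alt (collected_items : List (String × List String)) : List (String × List String) :=
  let order := PySem.List.dedup (collected_items.filterMap (fun p => classifyRuntimeMode p.1 p.2))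
  order.map (fun mode =>
    (mode, (collected_items.filter (fun p => classifyRuntimeMode p.1 p.2 == some mode)).map (fun p => p.1)))

-- ===== PRECONDITION & SPEC =====
def Spec_detect_runtime_modes (collected_items : List (String × List String)) (out : List (String × List String)) : Prop := out = detect_runtime_modes_alt collected_items
instance (collected_items : List (String × List String)) (out : List (String × List String)) : Decidable (Spec_detect_runtime_modes collected_items out) := by unfold Spec_detect_runtime_modes; infer_instance

-- ===== CLAIM (what is proved, stated in full; the proofs are below) =====
def Claim_equal_detect_runtime_modes : Prop := ∀ (collected_items : List (String × List String)), Dom_detect_runtime_modes collected_items → Spec_detect_runtime_modes collected_items (detect_runtime_modes collected_items)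

-- ===== LEMMAS AND PROOFS =====

-- proof-side abbreviations for A's loop body and B's per-mode group
def pvCl (p : String × List String) : Option String := classifyRuntimeMode p.1 p.2

def pvStep (modes : PySem.Dict String (List String)) (item : String × List String) : PySem.Dict String (List String) :=
  match classifyRuntimeMode item.1 item.2 with
  | none => modes
  | some runtimeMode => modes.modify runtimeMode [] (fun xs => xs ++ [item.1])

def pvGrp (m : String) (items : List (String × List String)) : List String :=
  (items.filter (fun p => pvCl p == some m)).map (fun p => p.1)

lemma pvGrp_cons (m : String) (p : String × List String) (rest : List (String × List String)) :
    pvGrp m (p :: rest) = if pvCl p == some m then p.1 :: pvGrp m rest else pvGrp m rest := by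
  simp only [pvGrp, List.filter_cons]
  split <;> simp_all

-- ordered-dedup characterization: folding Set.add from an arbitrary seed
lemma foldl_add_eq (xs : List String) : ∀ (s : List String),
    List.foldl PySem.Set.add s xs
      = s ++ (List.foldl PySem.Set.add ([] : List String) xs).filter (fun y => !s.contains y) := by
  induction xs with
  | nil => intro s; simp
  | cons x xs ih =>
    intro s
    have hx : List.foldl PySem.Set.add ([] : List String) (x :: xs)
        = x :: (List.foldl PySem.Set.add ([] : List String) xs).filter (fun y => !(y == x)) := by
      show List.foldl PySem.Set.add (PySem.Set.add [] x) xs = _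
      rw [ih (PySem.Set.add [] x)]
      have hsing : PySem.Set.add ([] : List String) x = [x] := by simp [PySem.Set.add]
      rw [hsing]
      simp only [List.singleton_append, List.cons.injEq, true_and]
      apply List.filter_congr
      intro y _
      by_cases h : y = x <;> simp [h, beq_iff_eq]
    rw [hx]
    show List.foldl PySem.Set.add (PySem.Set.add s x) xs = _
    rw [ih (PySem.Set.add s x)]
    by_cases hmem : x ∈ s
    · have hadd : PySem.Set.add s x = s := by
        simp [PySem.Set.add, PySem.Set.contains, hmem]
      have hfx : (x :: (List.foldl PySem.Set.add ([] : List String) xs).filter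
          (fun y => !(y == x))).filter (fun y => !s.contains y)
          = ((List.foldl PySem.Set.add ([] : List String) xs).filter
              (fun y => !(y == x))).filter (fun y => !s.contains y) := by
        simp [List.filter_cons, hmem]
      rw [hadd, hfx, List.filter_comm]
      congr 1
      symm
      rw [List.filter_eq_self]
      intro y hy
      rcases List.mem_filter.mp hy with ⟨-, hys⟩
      have hns : y ∉ s := by simpa using hys
      have hyx : y ≠ x := fun h => hns (h ▸ hmem)
      simp [hyx]
    · have hadd : PySem.Set.add s x = s ++ [x] := by
        simp [PySem.Set.add, PySem.Set.contains, hmem]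
      have hfx : (x :: (List.foldl PySem.Set.add ([] : List String) xs).filter
          (fun y => !(y == x))).filter (fun y => !s.contains y)
          = x :: ((List.foldl PySem.Set.add ([] : List String) xs).filter
              (fun y => !(y == x))).filter (fun y => !s.contains y) := by
        simp [List.filter_cons, hmem]
      rw [hadd, hfx]
      simp only [List.append_assoc, List.singleton_append, List.cons.injEq, true_and]
      congr 2
      rw [List.filter_filter]
      apply List.filter_congr
      intro y hy
      by_cases hyx : y = x <;> by_cases hys : y ∈ s <;>
        simp [List.contains_eq_mem, hyx, hys, beq_iff_eq]

lemma dedup_cons (x : String) (xs : List String) :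
    PySem.List.dedup (x :: xs) = x :: (PySem.List.dedup xs).filter (fun y => !(y == x)) := by
  show List.foldl PySem.Set.add (PySem.Set.add [] x) xs = _
  rw [foldl_add_eq xs (PySem.Set.add [] x)]
  have hsing : PySem.Set.add ([] : List String) x = [x] := by simp [PySem.Set.add]
  rw [hsing]
  show [x] ++ _ = x :: (List.foldl PySem.Set.add ([] : List String) xs).filter (fun y => !(y == x))
  simp only [List.singleton_append, List.cons.injEq, true_and]
  apply List.filter_congr
  intro y _
  by_cases h : y = x <;> simp [h, beq_iff_eq]

-- convenience forms of pvGrp_cons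
lemma pvGrp_cons_eq {p : String × List String} {m : String} (rest : List (String × List String))
    (h : pvCl p = some m) : pvGrp m (p :: rest) = p.1 :: pvGrp m rest := by
  simp [pvGrp_cons, h]

lemma pvGrp_cons_ne {p : String × List String} {m : String} (rest : List (String × List String))
    (h : pvCl p ≠ some m) : pvGrp m (p :: rest) = pvGrp m rest := by
  have hb : (pvCl p == some m) = false := by simpa using h
  simp [pvGrp_cons, hb]

-- main loop invariant: A's fold from any dict with distinct keys, described by B's groups
set_option maxHeartbeats 1000000 in
lemma foldl_step_items (items : List (String × List String)) :
    ∀ (d : PySem.Dict String (List String)), (d.items.map Prod.fst).Nodup →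
    (items.foldl pvStep d).items
      = d.items.map (fun kv => (kv.1, kv.2 ++ pvGrp kv.1 items))
        ++ ((PySem.List.dedup (items.filterMap pvCl)).filter (fun m => !d.contains m)).map
             (fun m => (m, pvGrp m items)) := by
  induction items with
  | nil =>
    intro d hd
    simp [pvGrp, PySem.List.dedup, PySem.Set.ofList, PySem.Set.empty]
  | cons p rest ih =>
    intro d hd
    have hfold : ((p :: rest).foldl pvStep d).items = (rest.foldl pvStep (pvStep d p)).items := by
      rw [List.foldl_cons]
    rw [hfold]
    rcases hcl : pvCl p with _ | m
    · -- p is classified as None: the dict is unchanged and p joins no group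
      have hcl' : classifyRuntimeMode p.1 p.2 = none := hcl
      have hstep : pvStep d p = d := by simp [pvStep, hcl']
      rw [hstep, ih d hd, List.filterMap_cons_none hcl]
      have e1 : d.items.map (fun kv => (kv.1, kv.2 ++ pvGrp kv.1 (p :: rest)))
          = d.items.map (fun kv => (kv.1, kv.2 ++ pvGrp kv.1 rest)) :=
        List.map_congr_left (fun kv _ => by rw [pvGrp_cons_ne rest (by simp [hcl])])
      have e2 : ((PySem.List.dedup (rest.filterMap pvCl)).filter (fun m => !d.contains m)).map
            (fun m => (m, pvGrp m (p :: rest)))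
          = ((PySem.List.dedup (rest.filterMap pvCl)).filter (fun m => !d.contains m)).map
            (fun m => (m, pvGrp m rest)) :=
        List.map_congr_left (fun m _ => by rw [pvGrp_cons_ne rest (by simp [hcl])])
      rw [e1, e2]
    · -- p is classified as mode m
      have hcl' : classifyRuntimeMode p.1 p.2 = some m := hcl
      have hstep : pvStep d p = d.insert m (d.getD m [] ++ [p.1]) := by
        simp [pvStep, hcl', PySem.Dict.modify]
      rw [hstep, List.filterMap_cons_some hcl, dedup_cons]
      by_cases hc : d.contains m = true
      · -- m already a key
        have hkeys : ((d.insert m (d.getD m [] ++ [p.1])).items.map Prod.fst)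
            = d.items.map Prod.fst := by
          simp only [PySem.Dict.insert, hc, if_pos]
          rw [List.map_map]
          apply List.map_congr_left
          intro kv _
          by_cases hkv : kv.1 = m <;> simp [hkv]
        rw [ih (d.insert m (d.getD m [] ++ [p.1])) (by rw [hkeys]; exact hd)]
        have hcont : ∀ y, (d.insert m (d.getD m [] ++ [p.1])).contains y = d.contains y := by
          intro y
          show ((d.insert m (d.getD m [] ++ [p.1])).items.any (fun q => q.1 == y))
              = (d.items.any (fun q => q.1 == y))
          have h1 := congrArg (fun l => l.any (fun z => z == y)) hkeys
          simpa [List.any_map, Function.comp] using h1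
        have e1 : (d.insert m (d.getD m [] ++ [p.1])).items.map
              (fun kv => (kv.1, kv.2 ++ pvGrp kv.1 rest))
            = d.items.map (fun kv => (kv.1, kv.2 ++ pvGrp kv.1 (p :: rest))) := by
          simp only [PySem.Dict.insert, hc, if_pos]
          rw [List.map_map]
          apply List.map_congr_left
          intro kv hkv
          by_cases hkv1 : kv.1 = m
          · have hget : d.getD m [] = kv.2 := by
              have hnd : (PySem.Dict.keys d).Nodup := by
                simpa [PySem.Dict.keys] using hd
              have hmem : (m, kv.2) ∈ d.items := by
                rw [← hkv1]; simpa using hkv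
              exact PySem.Dict.getD_of_mem_items d hmem hnd []
            have hbeq : (kv.1 == m) = true := by simpa using hkv1
            simp only [Function.comp_apply]
            rw [if_pos hbeq, hkv1, pvGrp_cons_eq rest hcl, ← hget]
            simp
          · have hne : ¬ ((kv.1 == m) = true) := by simpa using hkv1
            simp only [Function.comp_apply]
            rw [if_neg hne, pvGrp_cons_ne rest (by rw [hcl]; simpa using fun h => hkv1 h.symm)]
        have e2 : ((PySem.List.dedup (rest.filterMap pvCl)).filter
              (fun m' => !(d.insert m (d.getD m [] ++ [p.1])).contains m')).map
              (fun m' => (m', pvGrp m' rest))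
            = ((m :: (PySem.List.dedup (rest.filterMap pvCl)).filter (fun y => !(y == m))).filter
                (fun m' => !d.contains m')).map (fun m' => (m', pvGrp m' (p :: rest))) := by
          have hhead : ((m :: (PySem.List.dedup (rest.filterMap pvCl)).filter
                (fun y => !(y == m))).filter (fun m' => !d.contains m'))
              = ((PySem.List.dedup (rest.filterMap pvCl)).filter
                (fun y => !(y == m))).filter (fun m' => !d.contains m') := by
            simp [List.filter_cons, hc]
          rw [hhead, List.filter_comm]
          have hself : ((PySem.List.dedup (rest.filterMap pvCl)).filter
                (fun m' => !d.contains m')).filter (fun y => !(y == m))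
              = (PySem.List.dedup (rest.filterMap pvCl)).filter (fun m' => !d.contains m') := by
            rw [List.filter_eq_self]
            intro y hy
            rcases List.mem_filter.mp hy with ⟨-, hyd⟩
            have hym : y ≠ m := by
              intro h; rw [h, hc] at hyd; simp at hyd
            simpa using hym
          rw [hself]
          have hfeq : (PySem.List.dedup (rest.filterMap pvCl)).filter
                (fun m' => !(d.insert m (d.getD m [] ++ [p.1])).contains m')
              = (PySem.List.dedup (rest.filterMap pvCl)).filter (fun m' => !d.contains m') := by
            apply List.filter_congr
            intro y _
            rw [hcont y]
          rw [hfeq]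
          apply List.map_congr_left
          intro y hy
          rcases List.mem_filter.mp hy with ⟨-, hyd⟩
          have hym : y ≠ m := by
            intro h; rw [h, hc] at hyd; simp at hyd
          rw [pvGrp_cons_ne rest (by rw [hcl]; simpa using fun h => hym h.symm)]
        rw [e1, e2]
      · -- m is a new key
        have hc' : d.contains m = false := by simpa using hc
        have hm : m ∉ d.items.map Prod.fst := by
          intro hmem
          rcases List.mem_map.mp hmem with ⟨q, hq, hq1⟩
          have hcm : d.contains m = true := by
            show d.items.any (fun q => q.1 == m) = true
            exact List.any_eq_true.mpr ⟨q, hq, by simp [hq1]⟩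
          rw [hcm] at hc'
          cases hc'
        have hins : (d.insert m (d.getD m [] ++ [p.1])).items
            = d.items ++ [(m, d.getD m [] ++ [p.1])] := by
          simp [PySem.Dict.insert, hc']
        have hnd' : (((d.insert m (d.getD m [] ++ [p.1])).items).map Prod.fst).Nodup := by
          rw [hins]
          simp only [List.map_append, List.map_cons, List.map_nil]
          rw [List.nodup_append]
          refine ⟨hd, List.nodup_singleton _, ?_⟩
          have hx : ∀ a (x : List String), (a, x) ∈ d.items → ¬ a = m :=
            fun a x hax h => hm (List.mem_map.mpr ⟨(a, x), hax, h⟩)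
          simpa using hx
        rw [ih (d.insert m (d.getD m [] ++ [p.1])) hnd', hins]
        have hgetD : d.getD m [] = [] := PySem.Dict.getD_of_not_contains d [] hc'
        have hhead : ((m :: (PySem.List.dedup (rest.filterMap pvCl)).filter
              (fun y => !(y == m))).filter (fun m' => !d.contains m'))
            = m :: ((PySem.List.dedup (rest.filterMap pvCl)).filter
              (fun y => !(y == m))).filter (fun m' => !d.contains m') := by
          simp [List.filter_cons, hc']
        rw [hhead]
        simp only [List.map_append, List.map_cons, List.map_nil, List.nil_append, List.append_assoc]
        have e1 : d.items.map (fun kv => (kv.1, kv.2 ++ pvGrp kv.1 rest))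
            = d.items.map (fun kv => (kv.1, kv.2 ++ pvGrp kv.1 (p :: rest))) := by
          apply List.map_congr_left
          intro kv hkv
          have hkv1 : kv.1 ≠ m := fun h => hm (List.mem_map.mpr ⟨kv, hkv, h⟩)
          rw [pvGrp_cons_ne rest (by rw [hcl]; simpa using fun h => hkv1 h.symm)]
        have e2 : ((m, d.getD m [] ++ ([p.1] ++ pvGrp m rest)) : String × List String)
            = (m, pvGrp m (p :: rest)) := by
          rw [hgetD, pvGrp_cons_eq rest hcl]
          simp
        have hcont2 : ∀ y, (d.insert m (d.getD m [] ++ [p.1])).contains y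
            = (d.contains y || (m == y)) := by
          intro y
          simp [PySem.Dict.contains, hins, List.any_append]
        have e3 : ((PySem.List.dedup (rest.filterMap pvCl)).filter
              (fun m' => !(d.insert m (d.getD m [] ++ [p.1])).contains m')).map
              (fun m' => (m', pvGrp m' rest))
            = (((PySem.List.dedup (rest.filterMap pvCl)).filter (fun y => !(y == m))).filter
                (fun m' => !d.contains m')).map (fun m' => (m', pvGrp m' (p :: rest))) := by
          have hfilters : (PySem.List.dedup (rest.filterMap pvCl)).filter
                (fun m' => !(d.insert m (d.getD m [] ++ [p.1])).contains m')
              = ((PySem.List.dedup (rest.filterMap pvCl)).filter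
                (fun y => !(y == m))).filter (fun m' => !d.contains m') := by
            rw [List.filter_filter]
            apply List.filter_congr
            intro y _
            rw [hcont2 y]
            by_cases hym : y = m
            · simp [hym]
            · by_cases hyd : d.contains y = true
              · simp [hyd]
              · have hmy : (m == y) = false := by
                  simp only [beq_eq_false_iff_ne, ne_eq]
                  exact fun h => hym h.symm
                simp [hyd, hmy, hym, beq_iff_eq]
          rw [hfilters]
          apply List.map_congr_left
          intro y hy
          rcases List.mem_filter.mp hy with ⟨hy1, -⟩
          rcases List.mem_filter.mp hy1 with ⟨-, hym'⟩
          have hym : y ≠ m := by simpa using hym'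
          rw [pvGrp_cons_ne rest (by rw [hcl]; simpa using fun h => hym h.symm)]
        rw [e1, e2, e3, List.singleton_append]

-- ===== VERDICT (by name: the statement is the Claim_ definition above) =====
set_option maxHeartbeats 1000000 in
theorem detect_runtime_modes_spec : Claim_equal_detect_runtime_modes := by
  intro c _
  show detect_runtime_modes c = detect_runtime_modes_alt c
  have hA : detect_runtime_modes c = (c.foldl pvStep PySem.Dict.empty).items := by
    unfold detect_runtime_modes
    refine congrArg PySem.Dict.items ?_
    apply PySem.List.foldl_congr_mem
    intro acc x _
    rcases h : classifyRuntimeMode x.1 x.2 with _ | r <;> simp [pvStep, h]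
  rw [hA, foldl_step_items c PySem.Dict.empty (by simp [PySem.Dict.empty])]
  unfold detect_runtime_modes_alt
  simp only [pvGrp, pvCl, PySem.Dict.empty, PySem.Dict.contains, PySem.Dict.items, List.any_nil,
    Bool.not_false, List.filter_true, List.map_nil, List.nil_append]
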